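-- pv_equiv track=rewrite | github.com/hedone21/llm_rs2 | web_dashboard/backend/parser.py | _detect_timeseries_fields
-- ===== SOURCE A (Python) =====
-- def _detect_timeseries_fields(timeseries):
--     """Discover all field keys present in timeseries data."""
--     keys = set()
--     for sample in timeseries:
--         for k, v in sample.items():
--             if k == "timestamp":
--                 continue
--             keys.add(k)
--     return sorted(keys)
-- ===== SOURCE B (Python) =====
-- def _detect_timeseries_fields(timeseries):
--     """Discover all field keys present in timeseries data."""
--     # Sort-then-scan: flatten all keys (with duplicates), sort once, then a
--     # single linear sweep drops adjacent duplicates and the timestamp key.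
--     flat = sorted(k for sample in timeseries for k in sample)
--     out = []
--     for k in flat:
--         if k != "timestamp" and (not out or out[-1] != k):
--             out.append(k)
--     return out
-- ===== Notes on version B (the rewrite author's own statement) =====
-- stated objective: alternative
-- what changed: B never builds a set: it flattens all keys into one multiset, sorts it with duplicates, and a single linear sweep drops adjacent duplicates and the timestamp key (sort-then-scan dedup instead of hash-set accumulation then sort).
import Mathlib
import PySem

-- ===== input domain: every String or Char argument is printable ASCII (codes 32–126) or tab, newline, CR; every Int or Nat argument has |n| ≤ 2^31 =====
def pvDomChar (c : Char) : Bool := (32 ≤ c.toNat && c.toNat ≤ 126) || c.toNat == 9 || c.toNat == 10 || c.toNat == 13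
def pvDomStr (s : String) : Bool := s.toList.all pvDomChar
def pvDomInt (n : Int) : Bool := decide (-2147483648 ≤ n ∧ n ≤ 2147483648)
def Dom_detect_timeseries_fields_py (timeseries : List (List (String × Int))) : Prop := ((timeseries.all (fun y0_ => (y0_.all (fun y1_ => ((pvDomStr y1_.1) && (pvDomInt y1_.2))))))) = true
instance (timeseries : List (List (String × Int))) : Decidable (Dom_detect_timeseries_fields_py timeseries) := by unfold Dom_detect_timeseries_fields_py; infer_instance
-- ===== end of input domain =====

-- B never builds a set: it sorts the flat multiset of all keys once and removes adjacent
-- duplicates and the timestamp key in a single linear sweep (objective: alternative).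

-- ===== PORT A =====
def detect_timeseries_fields_py (timeseries : List (List (String × Int))) : List String :=
  let keys : PySem.Set String :=
    timeseries.foldl
      (fun keys sample =>
        sample.foldl
          (fun keys kv => if kv.1 = "timestamp" then keys else PySem.Set.add keys kv.1)
          keys)
      PySem.Set.empty
  PySem.List.sorted keys (fun x => x) false

-- ===== PORT B =====
def detect_timeseries_fields_py_alt (timeseries : List (List (String × Int))) : List String :=
  let flat : List String :=
    PySem.List.sorted (timeseries.flatMap (fun sample => sample.map Prod.fst)) (fun x => x) false
  flat.foldl
    (fun out k =>
      if k ≠ "timestamp" ∧ (out = [] ∨ out.getLast? ≠ some k) then out ++ [k] else out)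
    []

-- ===== PRECONDITION & SPEC =====
def Spec_detect_timeseries_fields_py (timeseries : List (List (String × Int))) (out : List String) : Prop := out = detect_timeseries_fields_py_alt timeseries
instance (timeseries : List (List (String × Int))) (out : List String) : Decidable (Spec_detect_timeseries_fields_py timeseries out) := by unfold Spec_detect_timeseries_fields_py; infer_instance

-- ===== CLAIM (what is proved, stated in full; the proofs are below) =====
def Claim_equal_detect_timeseries_fields_py : Prop := ∀ (timeseries : List (List (String × Int))), Dom_detect_timeseries_fields_py timeseries → Spec_detect_timeseries_fields_py timeseries (detect_timeseries_fields_py timeseries)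

-- ===== LEMMAS AND PROOFS =====

-- membership in A's inner fold over one sample
theorem memA_inner (sample : List (String × Int)) (acc : PySem.Set String) (y : String) :
    y ∈ sample.foldl
        (fun keys kv => if kv.1 = "timestamp" then keys else PySem.Set.add keys kv.1) acc
      ↔ y ∈ acc ∨ (y ≠ "timestamp" ∧ ∃ kv ∈ sample, y = kv.1) := by
  induction sample generalizing acc with
  | nil => simp
  | cons kv rest ih =>
    simp only [List.foldl_cons, ih]
    by_cases h : kv.1 = "timestamp" <;>
      simp [h, PySem.Set.mem_add] <;> constructor <;> intro hh <;> aesop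

theorem nodupA_inner (sample : List (String × Int)) (acc : PySem.Set String)
    (h : acc.Nodup) :
    (sample.foldl
        (fun keys kv => if kv.1 = "timestamp" then keys else PySem.Set.add keys kv.1) acc).Nodup := by
  induction sample generalizing acc with
  | nil => exact h
  | cons kv rest ih =>
    simp only [List.foldl_cons]
    apply ih
    by_cases hk : kv.1 = "timestamp"
    · simpa [hk]
    · simpa [hk] using PySem.Set.nodup_add _ _ h

theorem memA_outer (ts : List (List (String × Int))) (acc : PySem.Set String) (y : String) :
    y ∈ ts.foldl
        (fun keys sample =>
          sample.foldl
            (fun keys kv => if kv.1 = "timestamp" then keys else PySem.Set.add keys kv.1) keys)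
        acc
      ↔ y ∈ acc ∨ (y ≠ "timestamp" ∧ ∃ s ∈ ts, ∃ kv ∈ s, y = kv.1) := by
  induction ts generalizing acc with
  | nil => simp
  | cons s rest ih =>
    simp only [List.foldl_cons, ih, memA_inner]
    aesop

theorem nodupA_outer (ts : List (List (String × Int))) (acc : PySem.Set String)
    (h : acc.Nodup) :
    (ts.foldl
        (fun keys sample =>
          sample.foldl
            (fun keys kv => if kv.1 = "timestamp" then keys else PySem.Set.add keys kv.1) keys)
        acc).Nodup := by
  induction ts generalizing acc with
  | nil => exact h
  | cons s rest ih => exact ih _ (nodupA_inner _ _ h)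

-- every member of a strictly increasing list is ≤ its last element
theorem le_getLast_of_pairwise_lt (l : List String) (h : l.Pairwise (· < ·))
    (a : String) (ha : a ∈ l) (x : String) (hx : l.getLast? = some x) : a ≤ x := by
  induction l with
  | nil => simp at ha
  | cons b t ih =>
    cases t with
    | nil =>
      simp at ha hx
      simp [ha, hx]
    | cons c t' =>
      rw [List.getLast?_cons_cons] at hx
      rcases List.mem_cons.mp ha with h1 | h1
      · have hxm : x ∈ c :: t' := List.mem_of_getLast? hx
        have := (List.pairwise_cons.mp h).1 x hxm
        exact h1 ▸ le_of_lt this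
      · exact ih (List.pairwise_cons.mp h).2 h1 hx

-- B's sweep: started on a strictly increasing accumulator whose elements are ≤ every
-- element of the (weakly sorted) remaining list, it stays strictly increasing and its
-- members are exactly the old members plus the non-timestamp members of the list.
theorem sweepB (flat : List String) (out : List String)
    (hout : out.Pairwise (· < ·)) (hflat : flat.Pairwise (· ≤ ·))
    (hle : ∀ a ∈ out, ∀ b ∈ flat, a ≤ b) :
    (flat.foldl
        (fun out k =>
          if k ≠ "timestamp" ∧ (out = [] ∨ out.getLast? ≠ some k) then out ++ [k] else out)
        out).Pairwise (· < ·)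
    ∧ ∀ y, (y ∈ flat.foldl
        (fun out k =>
          if k ≠ "timestamp" ∧ (out = [] ∨ out.getLast? ≠ some k) then out ++ [k] else out)
        out ↔ y ∈ out ∨ (y ≠ "timestamp" ∧ y ∈ flat)) := by
  induction flat generalizing out with
  | nil => simpa using hout
  | cons k rest ih =>
    have hrest : rest.Pairwise (· ≤ ·) := (List.pairwise_cons.mp hflat).2
    have hkrest : ∀ b ∈ rest, k ≤ b := (List.pairwise_cons.mp hflat).1
    simp only [List.foldl_cons]
    by_cases hc : k ≠ "timestamp" ∧ (out = [] ∨ out.getLast? ≠ some k)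
    · rw [if_pos hc]
      have hlt : ∀ a ∈ out, a < k := by
        intro a ha
        have hak : a ≤ k := hle a ha k (by simp)
        rcases hc.2 with h0 | hl
        · simp [h0] at ha
        · refine lt_of_le_of_ne hak (fun hak' => ?_)
          have hne : out ≠ [] := fun h => by simp [h] at ha
          obtain ⟨l, hlast⟩ := Option.isSome_iff_exists.mp (List.getLast?_isSome.mpr hne)
          have hal : a ≤ l := le_getLast_of_pairwise_lt out hout a ha l hlast
          have hlk : l ≤ k := hle l (List.mem_of_getLast? hlast) k (by simp)
          have hlne : l ≠ k := fun h => hl (h ▸ hlast)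
          exact absurd (le_antisymm hlk (hak' ▸ hal)) hlne
      have hout' : (out ++ [k]).Pairwise (· < ·) := by
        rw [List.pairwise_append]
        exact ⟨hout, List.pairwise_singleton _ _, by simpa using hlt⟩
      have hle' : ∀ a ∈ out ++ [k], ∀ b ∈ rest, a ≤ b := by
        intro a ha b hb
        rcases List.mem_append.mp ha with h | h
        · exact hle a h b (by simp [hb])
        · simp at h; exact h ▸ hkrest b hb
      obtain ⟨hp, hm⟩ := ih (out ++ [k]) hout' hrest hle'
      refine ⟨hp, fun y => ?_⟩
      rw [hm y]
      have hkts : k ≠ "timestamp" := hc.1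
      simp only [List.mem_append, List.mem_cons, List.not_mem_nil, or_false]
      constructor
      · rintro ((h | h) | ⟨hne, h⟩)
        · exact Or.inl h
        · exact Or.inr ⟨h ▸ hkts, Or.inl h⟩
        · exact Or.inr ⟨hne, Or.inr h⟩
      · rintro (h | ⟨hne, (h | h)⟩)
        · exact Or.inl (Or.inl h)
        · exact Or.inl (Or.inr h)
        · exact Or.inr ⟨hne, h⟩
    · rw [if_neg hc]
      obtain ⟨hp, hm⟩ := ih out hout hrest (fun a ha b hb => hle a ha b (by simp [hb]))
      refine ⟨hp, fun y => ?_⟩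
      rw [hm y]
      simp only [List.mem_cons]
      constructor
      · rintro (h | ⟨hne, h⟩)
        · exact Or.inl h
        · exact Or.inr ⟨hne, Or.inr h⟩
      · rintro (h | ⟨hne, (h | h)⟩)
        · exact Or.inl h
        · subst h
          have hor : ¬(out = [] ∨ out.getLast? ≠ some y) := fun hor => hc ⟨hne, hor⟩
          have h3 : out.getLast? = some y := by
            by_cases hl : out.getLast? = some y
            · exact hl
            · exact absurd (Or.inr hl) hor
          exact Or.inl (List.mem_of_getLast? h3)
        · exact Or.inr ⟨hne, h⟩

-- the core equality on raw terms (the ports' bodies after zeta-reduction)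
theorem mainEq (ts : List (List (String × Int))) :
    PySem.List.sorted
      (ts.foldl
        (fun keys sample =>
          sample.foldl
            (fun keys kv => if kv.1 = "timestamp" then keys else PySem.Set.add keys kv.1) keys)
        PySem.Set.empty) (fun x => x) false
    = (PySem.List.sorted (ts.flatMap (fun sample => sample.map Prod.fst)) (fun x => x) false).foldl
        (fun out k =>
          if k ≠ "timestamp" ∧ (out = [] ∨ out.getLast? ≠ some k) then out ++ [k] else out)
        [] := by
  obtain ⟨hp, hm⟩ := sweepB
    (PySem.List.sorted (ts.flatMap (fun sample => sample.map Prod.fst)) (fun x => x) false) []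
    List.Pairwise.nil
    (PySem.List.sorted_pairwise (ts.flatMap (fun sample => sample.map Prod.fst)) (fun x => x))
    (by simp)
  apply PySem.List.sorted_eq_of_perm_of_pairwise_lt
  · rw [List.perm_ext_iff_of_nodup hp.nodup (nodupA_outer ts PySem.Set.empty (by simp [PySem.Set.empty]))]
    intro y
    rw [hm y, memA_outer]
    have hmf : y ∈ PySem.List.sorted (ts.flatMap (fun sample => sample.map Prod.fst)) (fun x => x) false
        ↔ ∃ s ∈ ts, ∃ kv ∈ s, y = kv.1 := by
      rw [PySem.List.mem_sorted]
      simp [List.mem_flatMap, eq_comm]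
    simp only [hmf]
    constructor
    · rintro (h | ⟨hne, hs⟩)
      · simp at h
      · exact Or.inr ⟨hne, hs⟩
    · rintro (h | ⟨hne, hs⟩)
      · simp [PySem.Set.empty] at h
      · exact Or.inr ⟨hne, hs⟩
  · exact hp

-- ===== VERDICT (by name: the statement is the Claim_ definition above) =====
theorem detect_timeseries_fields_py_spec : Claim_equal_detect_timeseries_fields_py := by
  intro ts _
  exact mainEq ts
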